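-- pv_equiv track=rewrite | github.com/iLearn-Lab/ICML-2025-Official-Implementation-for-STAR | star/utils/metaworld_utils.py | _convert_env_name_version
-- ===== SOURCE A (Python) =====
-- def _convert_env_name_version(env_name, version_suffix):
--     goal_suffix = "-goal-observable"
--     for current_suffix in ("-v2", "-v3"):
--         full_goal_suffix = f"{current_suffix}{goal_suffix}"
--         if env_name.endswith(full_goal_suffix):
--             return env_name[: -len(full_goal_suffix)] + f"{version_suffix}{goal_suffix}"
--     for current_suffix in ("-v2", "-v3"):
--         if env_name.endswith(current_suffix):
--             return env_name[: -len(current_suffix)] + version_suffix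
--     return env_name
-- ===== SOURCE B (Python) =====
-- def _convert_env_name_version(env_name, version_suffix):
--     # Greedy rightmost-split search (regex-style anchored match): find the largest
--     # split point k at which the tail env_name[k:] parses as a version token
--     # ("-v2" | "-v3") optionally followed by "-goal-observable", consuming the
--     # whole string; rebuild prefix + version_suffix + optional goal tail.
--     goal = "-goal-observable"
--     for k in range(len(env_name), -1, -1):
--         tail = env_name[k:]
--         if tail[:3] in ("-v2", "-v3"):
--             rest = tail[3:]
--             if rest == goal or rest == "":
--                 return env_name[:k] + version_suffix + rest
--     return env_name
-- ===== Notes on version B (the rewrite author's own statement) =====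
-- stated objective: alternative
-- what changed: B replaces A's two fixed endswith/slice suffix loops by a greedy rightmost-split search (regex-style anchored match): it scans split points k from the right and returns at the first k whose tail parses as a version token plus optional '-goal-observable' consuming the whole string.
import Mathlib
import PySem

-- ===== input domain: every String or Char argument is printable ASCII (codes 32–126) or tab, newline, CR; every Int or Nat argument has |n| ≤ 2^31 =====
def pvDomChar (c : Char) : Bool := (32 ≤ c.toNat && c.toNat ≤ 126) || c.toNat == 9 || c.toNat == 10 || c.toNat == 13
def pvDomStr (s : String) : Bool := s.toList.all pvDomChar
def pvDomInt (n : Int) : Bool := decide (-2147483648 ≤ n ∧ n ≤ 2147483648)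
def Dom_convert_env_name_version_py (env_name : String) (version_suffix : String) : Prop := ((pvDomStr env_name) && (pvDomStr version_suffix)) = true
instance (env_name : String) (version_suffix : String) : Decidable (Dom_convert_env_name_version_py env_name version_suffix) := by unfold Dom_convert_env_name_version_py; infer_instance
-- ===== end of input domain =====

-- B replaces A's two fixed suffix loops by a greedy rightmost-split search: it scans split
-- points k from the right and rebuilds at the first k whose tail parses as a version token
-- plus optional "-goal-observable" (objective: alternative, regex-style anchored match).


-- ===== PORT A =====
-- goal_suffix = "-goal-observable"
def pvGoalA : List Char := "-goal-observable".toList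

-- first for-loop: try "-v2"/"-v3" + goal suffix, early return
def pvLoop1 (s vs : List Char) : List (List Char) → Option (List Char)
  | [] => none
  | cur :: rest =>
    if PySem.Chars.endswith s (cur ++ pvGoalA) then
      some (PySem.List.slice s none (some (-(((cur ++ pvGoalA).length : Int)))) ++ vs ++ pvGoalA)
    else pvLoop1 s vs rest

-- second for-loop: try bare "-v2"/"-v3", early return
def pvLoop2 (s vs : List Char) : List (List Char) → Option (List Char)
  | [] => none
  | cur :: rest =>
    if PySem.Chars.endswith s cur then
      some (PySem.List.slice s none (some (-((cur.length : Int)))) ++ vs)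
    else pvLoop2 s vs rest

def convert_env_name_version_py (env_name : String) (version_suffix : String) : String :=
  let s := env_name.toList
  let vs := version_suffix.toList
  match pvLoop1 s vs ["-v2".toList, "-v3".toList] with
  | some r => String.ofList r
  | none =>
    match pvLoop2 s vs ["-v2".toList, "-v3".toList] with
    | some r => String.ofList r
    | none => env_name

-- ===== PORT B =====
def pvGoalB : List Char := "-goal-observable".toList

-- loop body at split point k: does the tail parse as ("-v2"|"-v3")("-goal-observable")?
-- env_name[k:] for 0 ≤ k ≤ len is List.drop k; tail[:3] is take 3, tail[3:] is drop 3 (exact)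
def pvParseTail (tail : List Char) : Option (List Char) :=
  if tail.take 3 = "-v2".toList ∨ tail.take 3 = "-v3".toList then
    if tail.drop 3 = pvGoalB ∨ tail.drop 3 = [] then some (tail.drop 3) else none
  else none

def pvStepB (s vs : List Char) (k : Nat) : Option (List Char) :=
  match pvParseTail (s.drop k) with
  | some rest => some (s.take k ++ vs ++ rest)
  | none => none

-- the for-loop over range(len, -1, -1) with early return
def pvSearchB (s vs : List Char) : Nat → Option (List Char)
  | 0 => pvStepB s vs 0
  | (k+1) =>
    match pvStepB s vs (k+1) with
    | some r => some r
    | none => pvSearchB s vs k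

def convert_env_name_version_py_alt (env_name : String) (version_suffix : String) : String :=
  match pvSearchB env_name.toList version_suffix.toList env_name.toList.length with
  | some r => String.ofList r
  | none => env_name

-- ===== PRECONDITION & SPEC =====
def Spec_convert_env_name_version_py (env_name : String) (version_suffix : String) (out : String) : Prop := out = convert_env_name_version_py_alt env_name version_suffix
instance (env_name : String) (version_suffix : String) (out : String) : Decidable (Spec_convert_env_name_version_py env_name version_suffix out) := by unfold Spec_convert_env_name_version_py; infer_instance

-- ===== CLAIM (what is proved, stated in full; the proofs are below) =====
def Claim_equal_convert_env_name_version_py : Prop := ∀ (env_name : String) (version_suffix : String), Dom_convert_env_name_version_py env_name version_suffix → Spec_convert_env_name_version_py env_name version_suffix (convert_env_name_version_py env_name version_suffix)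

-- ===== LEMMAS AND PROOFS =====

-- a bare version token cannot be a suffix of a string that ends in the goal suffix
theorem no_bare_token (s cur : List Char) (hcur : cur = "-v2".toList ∨ cur = "-v3".toList)
    (hg : pvGoalA <:+ s) : ¬ cur <:+ s := by
  intro hc
  rcases List.suffix_or_suffix_of_suffix hc hg with h1 | h1
  · rcases hcur with rfl | rfl <;> revert h1 <;> decide
  · have := h1.length_le
    rcases hcur with rfl | rfl <;> revert this <;> decide

-- a successful parse pins the tail to one of the four literal shapes
theorem parse_cases (tail rest : List Char) (h : pvParseTail tail = some rest) :
    ((tail = "-v2".toList ++ pvGoalB ∨ tail = "-v3".toList ++ pvGoalB) ∧ rest = pvGoalB)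
    ∨ ((tail = "-v2".toList ∨ tail = "-v3".toList) ∧ rest = []) := by
  unfold pvParseTail at h
  split_ifs at h with h1 h2
  · have hr : rest = tail.drop 3 := by injection h with h'; exact h'.symm
    have htd : tail = tail.take 3 ++ tail.drop 3 := (List.take_append_drop 3 tail).symm
    rcases h2 with hgoal | hnil
    · left
      refine ⟨?_, by rw [hr, hgoal]⟩
      rcases h1 with h1 | h1
      · left; rw [htd, h1, hgoal]
      · right; rw [htd, h1, hgoal]
    · right
      refine ⟨?_, by rw [hr, hnil]⟩
      rcases h1 with h1 | h1
      · left; rw [htd, h1, hnil]; simp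
      · right; rw [htd, h1, hnil]; simp

theorem step_cases (s vs : List Char) (k : Nat) (r : List Char) (h : pvStepB s vs k = some r) :
    ∃ rest, pvParseTail (s.drop k) = some rest ∧ r = s.take k ++ vs ++ rest := by
  unfold pvStepB at h
  cases heq : pvParseTail (s.drop k) with
  | none => rw [heq] at h; exact absurd h (by simp)
  | some rest => rw [heq] at h; exact ⟨rest, rfl, by injection h with h'; exact h'.symm⟩

theorem searchB_none (s vs : List Char) (m : Nat) (h : ∀ k, k ≤ m → pvStepB s vs k = none) :
    pvSearchB s vs m = none := by
  induction m with
  | zero => simpa [pvSearchB] using h 0 le_rfl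
  | succ m ih =>
    simp only [pvSearchB, h (m + 1) le_rfl]
    exact ih (fun k hk => h k (Nat.le_succ_of_le hk))

theorem searchB_found (s vs : List Char) (m k0 : Nat) (r : List Char)
    (h1 : k0 ≤ m) (h2 : pvStepB s vs k0 = some r)
    (h3 : ∀ k, k0 < k → k ≤ m → pvStepB s vs k = none) :
    pvSearchB s vs m = some r := by
  induction m with
  | zero =>
    have hk : k0 = 0 := Nat.le_zero.mp h1
    subst hk
    simpa [pvSearchB] using h2
  | succ m ih =>
    by_cases hk : k0 = m + 1
    · subst hk; simp only [pvSearchB, h2]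
    · have hk' : k0 ≤ m := by omega
      simp only [pvSearchB, h3 (m + 1) (by omega) le_rfl]
      exact ih hk' (fun k ha hb => h3 k ha (by omega))

theorem convert_main (env_name version_suffix : String) :
    convert_env_name_version_py env_name version_suffix
      = convert_env_name_version_py_alt env_name version_suffix := by
  unfold convert_env_name_version_py convert_env_name_version_py_alt
  simp only [pvLoop1, pvLoop2]
  set s := env_name.toList with hs
  set vs := version_suffix.toList with hvs
  have hGAB : pvGoalA = pvGoalB := rfl
  by_cases h2g : PySem.Chars.endswith s ("-v2".toList ++ pvGoalA)
  · -- A's first loop hits "-v2-goal-observable"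
    obtain ⟨t, ht⟩ := (PySem.Chars.endswith_iff _ _).mp h2g
    have hgsuf : pvGoalA <:+ s :=
      ((List.suffix_append "-v2".toList pvGoalA)).trans ⟨t, ht⟩
    have hlen : s.length = t.length + 19 := by rw [← ht]; simp [pvGoalA]
    have hdrop : s.drop t.length = "-v2".toList ++ pvGoalB := by
      rw [← ht]; exact List.drop_left
    have hstep : pvStepB s vs t.length = some (t ++ vs ++ pvGoalB) := by
      unfold pvStepB
      rw [hdrop, show pvParseTail ("-v2".toList ++ pvGoalB) = some pvGoalB from by decide,
          ← ht, List.take_left]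
    have hnone : ∀ k, t.length < k → k ≤ s.length → pvStepB s vs k = none := by
      intro k hk1 hk2
      cases hsk : pvStepB s vs k with
      | none => rfl
      | some r =>
        exfalso
        obtain ⟨rest, hp, -⟩ := step_cases s vs k r hsk
        rcases parse_cases _ _ hp with ⟨hge, -⟩ | ⟨hbare, -⟩
        · have hl : (s.drop k).length = 19 := by
            rcases hge with h | h <;> rw [h] <;> decide
          rw [List.length_drop, hlen] at hl
          omega
        · rcases hbare with h | h
          · exact no_bare_token s _ (Or.inl rfl) hgsuf (h ▸ List.drop_suffix k s)
          · exact no_bare_token s _ (Or.inr rfl) hgsuf (h ▸ List.drop_suffix k s)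
    rw [searchB_found s vs s.length t.length _ (by omega) hstep hnone]
    simp only [h2g, if_true]
    rw [← ht,
        PySem.List.slice_to_neg_natCast _ _ (by simp [pvGoalA]),
        show (t ++ ("-v2".toList ++ pvGoalA)).length - ("-v2".toList ++ pvGoalA).length
            = t.length from by simp,
        List.take_left, hGAB]
  · by_cases h3g : PySem.Chars.endswith s ("-v3".toList ++ pvGoalA)
    · -- A's first loop hits "-v3-goal-observable"
      obtain ⟨t, ht⟩ := (PySem.Chars.endswith_iff _ _).mp h3g
      have hgsuf : pvGoalA <:+ s :=
        ((List.suffix_append "-v3".toList pvGoalA)).trans ⟨t, ht⟩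
      have hlen : s.length = t.length + 19 := by rw [← ht]; simp [pvGoalA]
      have hdrop : s.drop t.length = "-v3".toList ++ pvGoalB := by
        rw [← ht]; exact List.drop_left
      have hstep : pvStepB s vs t.length = some (t ++ vs ++ pvGoalB) := by
        unfold pvStepB
        rw [hdrop, show pvParseTail ("-v3".toList ++ pvGoalB) = some pvGoalB from by decide,
            ← ht, List.take_left]
      have hnone : ∀ k, t.length < k → k ≤ s.length → pvStepB s vs k = none := by
        intro k hk1 hk2
        cases hsk : pvStepB s vs k with
        | none => rfl
        | some r =>
          exfalso
          obtain ⟨rest, hp, -⟩ := step_cases s vs k r hsk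
          rcases parse_cases _ _ hp with ⟨hge, -⟩ | ⟨hbare, -⟩
          · have hl : (s.drop k).length = 19 := by
              rcases hge with h | h <;> rw [h] <;> decide
            rw [List.length_drop, hlen] at hl
            omega
          · rcases hbare with h | h
            · exact no_bare_token s _ (Or.inl rfl) hgsuf (h ▸ List.drop_suffix k s)
            · exact no_bare_token s _ (Or.inr rfl) hgsuf (h ▸ List.drop_suffix k s)
      rw [searchB_found s vs s.length t.length _ (by omega) hstep hnone]
      simp only [h2g, h3g, if_true, if_false, Bool.false_eq_true]
      rw [← ht,
          PySem.List.slice_to_neg_natCast _ _ (by simp [pvGoalA]),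
          show (t ++ ("-v3".toList ++ pvGoalA)).length - ("-v3".toList ++ pvGoalA).length
              = t.length from by simp,
          List.take_left, hGAB]
    · by_cases h2 : PySem.Chars.endswith s "-v2".toList
      · -- A's second loop hits bare "-v2"
        obtain ⟨t, ht⟩ := (PySem.Chars.endswith_iff _ _).mp h2
        have hlen : s.length = t.length + 3 := by rw [← ht]; simp
        have hdrop : s.drop t.length = "-v2".toList := by
          rw [← ht]; exact List.drop_left
        have hstep : pvStepB s vs t.length = some (t ++ vs ++ ([] : List Char)) := by
          unfold pvStepB
          rw [hdrop, show pvParseTail "-v2".toList = some [] from by decide, ← ht, List.take_left]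
        have hnone : ∀ k, t.length < k → k ≤ s.length → pvStepB s vs k = none := by
          intro k hk1 hk2
          cases hsk : pvStepB s vs k with
          | none => rfl
          | some r =>
            exfalso
            obtain ⟨rest, hp, -⟩ := step_cases s vs k r hsk
            rcases parse_cases _ _ hp with ⟨hge, -⟩ | ⟨hbare, -⟩
            · rcases hge with h | h
              · exact h2g ((PySem.Chars.endswith_iff _ _).mpr (h ▸ List.drop_suffix k s))
              · exact h3g ((PySem.Chars.endswith_iff _ _).mpr (h ▸ List.drop_suffix k s))
            · have hl : (s.drop k).length = 3 := by
                rcases hbare with h | h <;> rw [h] <;> decide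
              rw [List.length_drop, hlen] at hl
              omega
        rw [searchB_found s vs s.length t.length _ (by omega) hstep hnone]
        simp only [h2g, h3g, h2, if_true, if_false, Bool.false_eq_true]
        rw [← ht, PySem.List.slice_to_neg_natCast _ _ (by decide),
            show (t ++ "-v2".toList).length - ("-v2".toList).length = t.length from by simp,
            List.take_left]
        simp
      · by_cases h3 : PySem.Chars.endswith s "-v3".toList
        · -- A's second loop hits bare "-v3"
          obtain ⟨t, ht⟩ := (PySem.Chars.endswith_iff _ _).mp h3
          have hlen : s.length = t.length + 3 := by rw [← ht]; simp
          have hdrop : s.drop t.length = "-v3".toList := by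
            rw [← ht]; exact List.drop_left
          have hstep : pvStepB s vs t.length = some (t ++ vs ++ ([] : List Char)) := by
            unfold pvStepB
            rw [hdrop, show pvParseTail "-v3".toList = some [] from by decide, ← ht, List.take_left]
          have hnone : ∀ k, t.length < k → k ≤ s.length → pvStepB s vs k = none := by
            intro k hk1 hk2
            cases hsk : pvStepB s vs k with
            | none => rfl
            | some r =>
              exfalso
              obtain ⟨rest, hp, -⟩ := step_cases s vs k r hsk
              rcases parse_cases _ _ hp with ⟨hge, -⟩ | ⟨hbare, -⟩
              · rcases hge with h | h
                · exact h2g ((PySem.Chars.endswith_iff _ _).mpr (h ▸ List.drop_suffix k s))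
                · exact h3g ((PySem.Chars.endswith_iff _ _).mpr (h ▸ List.drop_suffix k s))
              · rcases hbare with h | h
                · exact h2 ((PySem.Chars.endswith_iff _ _).mpr (h ▸ List.drop_suffix k s))
                · have hl : (s.drop k).length = 3 := by rw [h]; decide
                  rw [List.length_drop, hlen] at hl
                  omega
          rw [searchB_found s vs s.length t.length _ (by omega) hstep hnone]
          simp only [h2g, h3g, h2, h3, if_true, if_false, Bool.false_eq_true]
          rw [← ht, PySem.List.slice_to_neg_natCast _ _ (by decide),
              show (t ++ "-v3".toList).length - ("-v3".toList).length = t.length from by simp,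
              List.take_left]
          simp
        · -- no branch fires: both return env_name
          have hnone : ∀ k, k ≤ s.length → pvStepB s vs k = none := by
            intro k hk
            cases hsk : pvStepB s vs k with
            | none => rfl
            | some r =>
              exfalso
              obtain ⟨rest, hp, -⟩ := step_cases s vs k r hsk
              rcases parse_cases _ _ hp with ⟨hge, -⟩ | ⟨hbare, -⟩
              · rcases hge with h | h
                · exact h2g ((PySem.Chars.endswith_iff _ _).mpr (h ▸ List.drop_suffix k s))
                · exact h3g ((PySem.Chars.endswith_iff _ _).mpr (h ▸ List.drop_suffix k s))
              · rcases hbare with h | h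
                · exact h2 ((PySem.Chars.endswith_iff _ _).mpr (h ▸ List.drop_suffix k s))
                · exact h3 ((PySem.Chars.endswith_iff _ _).mpr (h ▸ List.drop_suffix k s))
          rw [searchB_none s vs s.length hnone]
          have h2g' : PySem.Chars.endswith s ('-' :: 'v' :: '2' :: pvGoalA) = false :=
            Bool.eq_false_iff.mpr h2g
          have h3g' : PySem.Chars.endswith s ('-' :: 'v' :: '3' :: pvGoalA) = false :=
            Bool.eq_false_iff.mpr h3g
          have h2' : PySem.Chars.endswith s ['-', 'v', '2'] = false := Bool.eq_false_iff.mpr h2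
          have h3' : PySem.Chars.endswith s ['-', 'v', '3'] = false := Bool.eq_false_iff.mpr h3
          simp [h2g', h3g', h2', h3']

-- ===== VERDICT (by name: the statement is the Claim_ definition above) =====
theorem convert_env_name_version_py_spec : Claim_equal_convert_env_name_version_py := by
  intro e v _
  unfold Spec_convert_env_name_version_py
  exact convert_main e v
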